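-- pv_equiv track=rewrite | github.com/NonsenseNorm/minishells | test_reviewsheet.py | strip_echoed_commands
-- ===== SOURCE A (Python) =====
-- def strip_echoed_commands(output: str, commands: list) -> str:
--     """
--     claude/minishell echoes the first line of each command before its output
--     when running non-interactively.  Strip those echo lines in order.
--     Multi-line commands (heredoc) are echoed only by their first line.
--     """
--     lines = output.split("\n")
--     result = []
--     # For each command, what minishell echoes is the first line only
--     first_lines = [cmd.split("\n")[0] for cmd in commands if cmd.strip()]
--     cmd_idx = 0
--     for line in lines:
--         if cmd_idx < len(first_lines) and line == first_lines[cmd_idx]: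
--             cmd_idx += 1
--         else:
--             result.append(line)
--     return "\n".join(result)
-- ===== SOURCE B (Python) =====
-- def strip_echoed_commands(output: str, commands: list) -> str:
--     """Same stripping, different decomposition: outer loop over the expected
--     echo lines with a single forward cursor into the output lines, collecting
--     the matched line indices in a removal set, then one final filter pass."""
--     lines = output.split("\n")
--     first_lines = [cmd.split("\n")[0] for cmd in commands if cmd.strip()]
--     removed = set()
--     pos = 0
--     for fl in first_lines:
--         while pos < len(lines) and lines[pos] != fl:
--             pos += 1
--         if pos < len(lines):
--             removed.add(pos)
--             pos += 1
--     return "\n".join(lines[i] for i in range(len(lines)) if i not in removed)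
-- ===== Notes on version B (the rewrite author's own statement) =====
-- stated objective: alternative
-- what changed: Inverts the loop nesting: instead of one pass over the output lines with a command index, B loops over the expected echoed first-lines with a forward cursor into the lines, records matched indices in a removal set, and rebuilds the output in a final filter pass over all line indices.
import Mathlib
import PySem

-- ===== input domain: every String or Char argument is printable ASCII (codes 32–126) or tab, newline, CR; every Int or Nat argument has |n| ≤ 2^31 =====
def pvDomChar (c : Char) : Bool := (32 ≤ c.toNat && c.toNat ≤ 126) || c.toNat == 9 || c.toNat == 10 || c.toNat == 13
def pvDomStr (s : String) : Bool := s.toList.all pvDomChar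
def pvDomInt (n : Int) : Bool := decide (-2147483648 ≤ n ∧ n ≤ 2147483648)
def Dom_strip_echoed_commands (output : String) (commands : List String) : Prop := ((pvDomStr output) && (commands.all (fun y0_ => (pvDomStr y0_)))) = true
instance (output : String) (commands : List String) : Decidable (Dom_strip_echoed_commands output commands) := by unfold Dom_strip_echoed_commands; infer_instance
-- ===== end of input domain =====

-- B keeps A's behaviour exactly; it inverts the loop nesting (outer loop over the
-- expected echo lines with a forward cursor, removal-index set, final filter pass).

-- ===== PORT A =====
def strip_echoed_commands (output : String) (commands : List String) : String :=
  let lines := (PySem.Str.split? output "\n").getD []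
  let first_lines := (commands.filter (fun cmd => PySem.Str.strip cmd ≠ "")).map
      (fun cmd => ((PySem.Str.split? cmd "\n").getD []).headD "")
  let fin := lines.foldl (fun (st : Nat × List String) line =>
      if st.1 < first_lines.length ∧ line = first_lines.getD st.1 "" then (st.1 + 1, st.2)
      else (st.1, st.2 ++ [line])) (0, [])
  PySem.Str.join "\n" fin.2

-- ===== PORT B =====
-- the 'while pos < len(lines) and lines[pos] != fl: pos += 1' loop of Source B
def pvSeek (lines : List String) (fl : String) (pos : Nat) : Nat :=
  if pos < lines.length ∧ lines.getD pos "" ≠ fl then pvSeek lines fl (pos + 1) else pos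
termination_by lines.length - pos
decreasing_by omega

def strip_echoed_commands_alt (output : String) (commands : List String) : String :=
  let lines := (PySem.Str.split? output "\n").getD []
  let first_lines := (commands.filter (fun cmd => PySem.Str.strip cmd ≠ "")).map
      (fun cmd => ((PySem.Str.split? cmd "\n").getD []).headD "")
  let st := first_lines.foldl (fun (st : Nat × PySem.Set Nat) fl =>
      let p := pvSeek lines fl st.1
      if p < lines.length then (p + 1, PySem.Set.add st.2 p) else (p, st.2))
      (0, ([] : PySem.Set Nat))
  PySem.Str.join "\n"
    (((List.range lines.length).filter (fun i => decide (i ∉ st.2))).map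
      (fun i => lines.getD i ""))

-- ===== PRECONDITION & SPEC =====
def Spec_strip_echoed_commands (output : String) (commands : List String) (out : String) : Prop := out = strip_echoed_commands_alt output commands
instance (output : String) (commands : List String) (out : String) : Decidable (Spec_strip_echoed_commands output commands out) := by unfold Spec_strip_echoed_commands; infer_instance

-- ===== CLAIM (what is proved, stated in full; the proofs are below) =====
def Claim_equal_strip_echoed_commands : Prop := ∀ (output : String) (commands : List String), Dom_strip_echoed_commands output commands → Spec_strip_echoed_commands output commands (strip_echoed_commands output commands)

-- ===== LEMMAS AND PROOFS =====

-- the common sequential-greedy specification both loops compute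
def pvMerge : List String → List String → List String
  | [], _ => []
  | l :: ls, [] => l :: pvMerge ls []
  | l :: ls, f :: fs => if l = f then pvMerge ls fs else l :: pvMerge ls (f :: fs)

theorem aLoop_eq (fls : List String) :
    ∀ (lines : List String) (k : Nat) (acc : List String),
    (lines.foldl (fun (st : Nat × List String) line =>
        if st.1 < fls.length ∧ line = fls.getD st.1 "" then (st.1 + 1, st.2)
        else (st.1, st.2 ++ [line])) (k, acc)).2 = acc ++ pvMerge lines (fls.drop k) := by
  intro lines
  induction lines with
  | nil => intro k acc; simp [pvMerge]
  | cons l ls ih =>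
    intro k acc
    rw [List.foldl_cons]
    by_cases hk : k < fls.length
    · have hdrop : fls.drop k = fls[k] :: fls.drop (k + 1) := List.drop_eq_getElem_cons hk
      have hgetD : fls.getD k "" = fls[k] := by
        rw [List.getD_eq_getElem?_getD, List.getElem?_eq_getElem hk]; rfl
      by_cases hl : l = fls.getD k ""
      · rw [if_pos ⟨hk, hl⟩, ih, hdrop]
        simp only [pvMerge]
        rw [if_pos (by rw [← hgetD]; exact hl)]
      · rw [if_neg (by tauto), ih, hdrop]
        simp only [pvMerge]
        rw [if_neg (by rw [← hgetD]; exact hl)]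
        simp
    · have hdrop : fls.drop k = [] := List.drop_eq_nil_of_le (by omega)
      rw [if_neg (by tauto), ih, hdrop]
      simp only [pvMerge]
      simp

-- seek facts
theorem pvSeek_ge (lines : List String) (fl : String) (pos : Nat) :
    pos ≤ pvSeek lines fl pos := by
  induction pos using pvSeek.induct lines fl with
  | case1 pos h ih => rw [pvSeek, if_pos h]; omega
  | case2 pos h => rw [pvSeek, if_neg h]

theorem pvSeek_le (lines : List String) (fl : String) (pos : Nat) (h : pos ≤ lines.length) :
    pvSeek lines fl pos ≤ lines.length := by
  induction pos using pvSeek.induct lines fl with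
  | case1 pos hc ih => rw [pvSeek, if_pos hc]; exact ih (by omega)
  | case2 pos hc => rw [pvSeek, if_neg hc]; exact h

theorem pvSeek_hit (lines : List String) (fl : String) (pos : Nat)
    (h : pvSeek lines fl pos < lines.length) :
    lines.getD (pvSeek lines fl pos) "" = fl := by
  induction pos using pvSeek.induct lines fl with
  | case1 pos hc ih => rw [pvSeek, if_pos hc] at h ⊢; exact ih h
  | case2 pos hc =>
    rw [pvSeek, if_neg hc] at h ⊢
    by_contra hne
    exact hc ⟨h, hne⟩

theorem pvSeek_miss (lines : List String) (fl : String) (pos : Nat) :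
    ∀ i, pos ≤ i → i < pvSeek lines fl pos → lines.getD i "" ≠ fl := by
  induction pos using pvSeek.induct lines fl with
  | case1 pos hc ih =>
    intro i h1 h2
    rw [pvSeek, if_pos hc] at h2
    rcases Nat.eq_or_lt_of_le h1 with rfl | hlt
    · exact hc.2
    · exact ih i (by omega) h2
  | case2 pos hc =>
    intro i h1 h2
    rw [pvSeek, if_neg hc] at h2
    omega

-- a suffix of the output-lines list, via index filtering (the shape of B's final pass)
def pvSeg (lines : List String) (S : List Nat) (a b : Nat) : List String :=
  ((List.range' a (b - a)).filter (fun i => decide (i ∉ S))).map (fun i => lines.getD i "")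

theorem map_getD_range' (lines : List String) :
    ∀ a, (List.range' a (lines.length - a)).map (fun i => lines.getD i "") = lines.drop a := by
  intro a
  induction h : lines.length - a generalizing a with
  | zero =>
    have hle : lines.length ≤ a := by omega
    rw [List.range'_zero, List.map_nil, List.drop_eq_nil_of_le hle]
  | succ m ih =>
    have ha : a < lines.length := by omega
    rw [List.range'_succ, List.map_cons, ih (a + 1) (by omega), List.drop_eq_getElem_cons ha]
    congr 1
    rw [List.getD_eq_getElem?_getD, List.getElem?_eq_getElem ha]; rfl

theorem pvMerge_nil_right : ∀ ls : List String, pvMerge ls [] = ls := by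
  intro ls
  induction ls with
  | nil => rfl
  | cons l ls ih => simp only [pvMerge, ih]

theorem range'_split (a b c : Nat) (h1 : a ≤ b) (h2 : b ≤ c) :
    List.range' a (c - a) = List.range' a (b - a) ++ List.range' b (c - b) := by
  have h3 : c - a = (b - a) + (c - b) := by omega
  have h4 : a + (b - a) = b := by omega
  rw [h3, ← List.range'_append_1, h4]

theorem pvMerge_no_match (fl : String) (fs : List String) :
    ∀ ls : List String, (∀ l ∈ ls, l ≠ fl) → pvMerge ls (fl :: fs) = ls := by
  intro ls
  induction ls with
  | nil => intro _; rfl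
  | cons l ls ih =>
    intro h
    rw [pvMerge, if_neg (h l (by simp))]
    rw [ih (fun x hx => h x (by simp [hx]))]

theorem pvMerge_gap (lines : List String) (fl : String) (fs : List String) (p : Nat)
    (hp : p < lines.length) (hhit : lines.getD p "" = fl) :
    ∀ (g pos : Nat), p - pos = g → pos ≤ p →
    (∀ i, pos ≤ i → i < p → lines.getD i "" ≠ fl) →
    pvMerge (lines.drop pos) (fl :: fs) =
      (List.range' pos (p - pos)).map (fun i => lines.getD i "") ++
        pvMerge (lines.drop (p + 1)) fs := by
  intro g
  induction g with
  | zero =>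
    intro pos hg h1 _
    have heq : pos = p := by omega
    subst heq
    rw [List.drop_eq_getElem_cons hp]
    simp only [pvMerge]
    have hl : lines[pos] = fl := by
      rw [← hhit, List.getD_eq_getElem?_getD, List.getElem?_eq_getElem hp]; rfl
    rw [if_pos hl, hg]
    simp
  | succ g ih =>
    intro pos hg h1 hmiss
    have hposlt : pos < lines.length := by omega
    rw [List.drop_eq_getElem_cons hposlt]
    simp only [pvMerge]
    have hne : lines[pos] ≠ fl := by
      have h := hmiss pos (le_refl _) (by omega)
      rw [List.getD_eq_getElem?_getD, List.getElem?_eq_getElem hposlt] at h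
      simpa using h
    rw [if_neg hne]
    rw [ih (pos + 1) (by omega) (by omega) (fun i hi1 hi2 => hmiss i (by omega) hi2)]
    have hsp : p - pos = (p - (pos + 1)) + 1 := by omega
    rw [hsp, List.range'_succ]
    simp only [List.map_cons, List.cons_append]
    congr 1
    rw [List.getD_eq_getElem?_getD, List.getElem?_eq_getElem hposlt]; rfl

-- B's fold does nothing once the cursor is at the end
theorem bLoop_at_end (lines : List String) :
    ∀ (fls : List String) (R : PySem.Set Nat),
    fls.foldl (fun (st : Nat × PySem.Set Nat) fl =>
        let p := pvSeek lines fl st.1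
        if p < lines.length then (p + 1, PySem.Set.add st.2 p) else (p, st.2))
      (lines.length, R) = (lines.length, R) := by
  intro fls
  induction fls with
  | nil => intro R; rfl
  | cons fl fls ih =>
    intro R
    have hseek : pvSeek lines fl lines.length = lines.length := by
      rw [pvSeek, if_neg (by omega)]
    simp only [List.foldl_cons, hseek]
    rw [if_neg (by omega)]
    exact ih R

theorem bLoop_spec (lines : List String) :
    ∀ (fls : List String) (pos : Nat) (R : PySem.Set Nat),
    (∀ x ∈ R, x < pos) → pos ≤ lines.length →
    (∀ x ∈ (fls.foldl (fun (st : Nat × PySem.Set Nat) fl =>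
        let p := pvSeek lines fl st.1
        if p < lines.length then (p + 1, PySem.Set.add st.2 p) else (p, st.2)) (pos, R)).2,
        x ∈ R ∨ (pos ≤ x ∧ x < lines.length)) ∧
    pvSeg lines (fls.foldl (fun (st : Nat × PySem.Set Nat) fl =>
        let p := pvSeek lines fl st.1
        if p < lines.length then (p + 1, PySem.Set.add st.2 p) else (p, st.2)) (pos, R)).2
        pos lines.length = pvMerge (lines.drop pos) fls := by
  intro fls
  induction fls with
  | nil =>
    intro pos R hR hpos
    constructor
    · intro x hx; exact Or.inl hx
    · simp only [List.foldl_nil]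
      unfold pvSeg
      have : (List.range' pos (lines.length - pos)).filter (fun i => decide (i ∉ R)) =
          List.range' pos (lines.length - pos) := by
        apply List.filter_eq_self.mpr
        intro i hi
        simp only [decide_eq_true_eq]
        intro hiR
        have := hR i hiR
        have := List.mem_range'.mp hi
        omega
      rw [this, map_getD_range']
      rw [pvMerge_nil_right]
  | cons fl fls ih =>
    intro pos R hR hpos
    simp only [List.foldl_cons]
    set p := pvSeek lines fl pos with hp
    have hge : pos ≤ p := pvSeek_ge lines fl pos
    have hle : p ≤ lines.length := pvSeek_le lines fl pos hpos
    by_cases hplt : p < lines.length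
    · rw [if_pos hplt]
      have hpR : p ∉ R := fun h => by have := hR p h; omega
      have hadd : PySem.Set.add R p = R ++ [p] := by
        simp [PySem.Set.add, hpR]
      have hR' : ∀ x ∈ PySem.Set.add R p, x < p + 1 := by
        intro x hx
        rw [hadd] at hx
        rcases List.mem_append.mp hx with h | h
        · have := hR x h; omega
        · simp at h; omega
      obtain ⟨hmem, hseg⟩ := ih (p + 1) (PySem.Set.add R p) hR' (by omega)
      set st2 := ((fls.foldl (fun (st : Nat × PySem.Set Nat) fl =>
          let p := pvSeek lines fl st.1
          if p < lines.length then (p + 1, PySem.Set.add st.2 p) else (p, st.2))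
          (p + 1, PySem.Set.add R p)).2) with hst2
      constructor
      · intro x hx
        rcases hmem x hx with h | h
        · rw [hadd] at h
          rcases List.mem_append.mp h with h | h
          · exact Or.inl h
          · simp at h; subst h; exact Or.inr ⟨hge, hplt⟩
        · exact Or.inr ⟨by omega, h.2⟩
      · -- split the range [pos, n) at p+1
        unfold pvSeg
        have hsplit : List.range' pos (lines.length - pos) =
            List.range' pos (p + 1 - pos) ++ List.range' (p + 1) (lines.length - (p + 1)) :=
          range'_split pos (p + 1) lines.length (by omega) (by omega)
        rw [hsplit, List.filter_append, List.map_append]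
        have hpre : (List.range' pos (p + 1 - pos)).filter (fun i => decide (i ∉ st2)) =
            List.range' pos (p - pos) := by
          have hsplit2 : List.range' pos (p + 1 - pos) =
              List.range' pos (p - pos) ++ [p] := by
            have : p + 1 - pos = (p - pos) + 1 := by omega
            rw [this, List.range'_1_concat]
            congr 2
            omega
          rw [hsplit2, List.filter_append]
          have h1 : (List.range' pos (p - pos)).filter (fun i => decide (i ∉ st2)) =
              List.range' pos (p - pos) := by
            apply List.filter_eq_self.mpr
            intro i hi
            have hi' := List.mem_range'.mp hi
            simp only [decide_eq_true_eq]
            intro hist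
            rcases hmem i hist with h | h
            · rw [hadd] at h
              rcases List.mem_append.mp h with h | h
              · have := hR i h; omega
              · simp at h; omega
            · omega
          have h2 : List.filter (fun i => decide (i ∉ st2)) [p] = [] := by
            have hpin : p ∈ st2 := by
              -- p ∈ add R p ⊆ st2: the fold only grows the set
              have hsub : ∀ (fs : List String) (q : Nat) (S : PySem.Set Nat), ∀ x ∈ S,
                  x ∈ (fs.foldl (fun (st : Nat × PySem.Set Nat) fl =>
                    let p := pvSeek lines fl st.1
                    if p < lines.length then (p + 1, PySem.Set.add st.2 p) else (p, st.2)) (q, S)).2 := by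
                intro fs
                induction fs with
                | nil => intro q S x hx; exact hx
                | cons g gs ihg =>
                  intro q S x hx
                  simp only [List.foldl_cons]
                  by_cases hq : pvSeek lines g q < lines.length
                  · rw [if_pos hq]
                    exact ihg _ _ x (by rw [PySem.Set.mem_add]; exact Or.inl hx)
                  · rw [if_neg hq]
                    exact ihg _ _ x hx
              exact hsub fls (p + 1) (PySem.Set.add R p) p
                (by rw [PySem.Set.mem_add]; exact Or.inr rfl)
            simp [hpin]
          rw [h1, h2, List.append_nil]
        rw [hpre]
        rw [pvMerge_gap lines fl fls p hplt (pvSeek_hit lines fl pos hplt) (p - pos) pos rfl hge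
            (pvSeek_miss lines fl pos)]
        congr 1
    · rw [if_neg hplt]
      have hpn : p = lines.length := by omega
      rw [hpn, bLoop_at_end lines fls R]
      constructor
      · intro x hx; exact Or.inl hx
      · unfold pvSeg
        have hfilt : (List.range' pos (lines.length - pos)).filter (fun i => decide (i ∉ R)) =
            List.range' pos (lines.length - pos) := by
          apply List.filter_eq_self.mpr
          intro i hi
          simp only [decide_eq_true_eq]
          intro hiR
          have := hR i hiR
          have := List.mem_range'.mp hi
          omega
        rw [hfilt, map_getD_range']
        rw [pvMerge_no_match fl fls (lines.drop pos) ?_]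
        intro l hl
        obtain ⟨j, hj, hjl⟩ := List.mem_iff_getElem.mp hl
        have hjlen : pos + j < lines.length := by
          simp only [List.length_drop] at hj; omega
        have hgd : lines.getD (pos + j) "" = l := by
          rw [List.getD_eq_getElem?_getD, List.getElem?_eq_getElem hjlen]
          rw [← hjl, List.getElem_drop]
          rfl
        have := pvSeek_miss lines fl pos (pos + j) (by omega) (by omega)
        rw [hgd] at this
        exact this

-- ===== VERDICT (by name: the statement is the Claim_ definition above) =====
theorem strip_echoed_commands_spec : Claim_equal_strip_echoed_commands := by
  unfold Claim_equal_strip_echoed_commands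
  intro output commands _
  unfold Spec_strip_echoed_commands strip_echoed_commands strip_echoed_commands_alt
  simp only []
  rw [aLoop_eq, List.drop_zero, List.nil_append]
  have hB := (bLoop_spec ((PySem.Str.split? output "\n").getD [])
      ((commands.filter fun cmd => PySem.Str.strip cmd ≠ "").map
        (fun cmd => ((PySem.Str.split? cmd "\n").getD []).headD ""))
      0 [] (by intro x hx; cases hx) (Nat.zero_le _)).2
  rw [List.drop_zero] at hB
  rw [← hB]
  unfold pvSeg
  rw [Nat.sub_zero, ← List.range_eq_range']
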